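-- pv_equiv track=rewrite | github.com/HeesangJin/algorithm_study | 2.기능개발/solution_my.py | solution
-- ===== SOURCE A (Python) =====
-- def solution(progresses, speeds):
--
--     fin_dates = []
--     N = len(progresses)
--     for i in range(N):
--         #  x is finished date such that a + bx <= 100
--         a = progresses[i]
--         b = speeds[i]
--         x = (100- a) // b
--         if (100 - a) % b != 0:
--             x = x + 1
--         fin_dates.append(x)
--
--     answer = []
--     cur_max = fin_dates[0]
--     cur_cnt = 1
--     del fin_dates[0]
--
--     for val in fin_dates:
--         if cur_max >= val:
--             cur_cnt = cur_cnt + 1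
--         else:
--             answer.append(cur_cnt)
--             cur_max = val
--             cur_cnt = 1
--
--     answer.append(cur_cnt)
--     return answer
-- ===== SOURCE B (Python) =====
-- def _rle(xs):
--     # recursive run-length encoding: length of each maximal run of equal values
--     if not xs:
--         return []
--     k = 1
--     while k < len(xs) and xs[k] == xs[0]:
--         k += 1
--     return [k] + _rle(xs[k:])
--
-- def solution(progresses, speeds):
--     # finish day of each feature, by ceiling division
--     days = [-((p - 100) // s) for p, s in zip(progresses, speeds)]
--     # running maximum of finish days: constant exactly within one release batch
--     peaks = []
--     m = days[0]
--     for d in days: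
--         m = m if m >= d else d
--         peaks.append(m)
--     # batch sizes = run lengths of the running-maximum sequence
--     return _rle(peaks)
-- ===== Notes on version B (the rewrite author's own statement) =====
-- stated objective: alternative
-- what changed: Replaced A's stateful running-max/counter grouping loop with a staged pipeline: compute finish days, build the prefix-maximum sequence (constant exactly within a release batch), and recursively run-length-encode that sequence; batch sizes fall out as run lengths instead of being counted by a live counter.
import Mathlib
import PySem

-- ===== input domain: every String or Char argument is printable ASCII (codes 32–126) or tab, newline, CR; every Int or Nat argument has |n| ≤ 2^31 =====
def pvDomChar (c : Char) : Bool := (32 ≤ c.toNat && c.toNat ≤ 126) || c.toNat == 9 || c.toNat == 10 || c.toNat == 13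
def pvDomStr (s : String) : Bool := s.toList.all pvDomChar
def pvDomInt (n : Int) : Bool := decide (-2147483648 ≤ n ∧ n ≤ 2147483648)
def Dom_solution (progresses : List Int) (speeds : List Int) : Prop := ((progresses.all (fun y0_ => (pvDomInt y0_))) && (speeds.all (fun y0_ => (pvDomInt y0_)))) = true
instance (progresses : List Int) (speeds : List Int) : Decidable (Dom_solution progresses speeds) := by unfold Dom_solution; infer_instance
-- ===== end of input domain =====

-- B replaces A's running-max/counter grouping loop with a pipeline: finish days,
-- then the prefix-maximum sequence, then a recursive run-length encoding of it.

-- ===== PORT A =====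
-- literal port: first loop builds fin_dates, then a scan groups them
def solution (progresses : List Int) (speeds : List Int) : List Int :=
  let finDates := (PySem.List.pyRange 0 (progresses.length : Int)).foldl
      (fun acc i =>
        let a := PySem.List.pyGetD progresses i 0
        let b := PySem.List.pyGetD speeds i 0
        let x := PySem.Int.floordiv (100 - a) b
        let x := if PySem.Int.mod (100 - a) b ≠ 0 then x + 1 else x
        acc ++ [x]) []
  match finDates with
  | [] => []  -- Python raises IndexError here (fin_dates[0]); excluded by Pre_solution
  | m :: rest =>
    -- state: (answer, cur_max, cur_cnt)
    let st := rest.foldl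
      (fun (st : List Int × Int × Int) val =>
        if st.2.1 ≥ val then (st.1, st.2.1, st.2.2 + 1)
        else (st.1 ++ [st.2.2], val, 1)) ([], m, 1)
    st.1 ++ [st.2.2]

-- ===== PORT B =====
-- port of Source B's _rle: the while loop counts the leading elements of xs[1:] equal
-- to xs[0] (exactly takeWhile), then recurses on the remainder xs[k:] (dropWhile)
def rleAux (xs : List Int) : List Int :=
  match xs with
  | [] => []
  | x :: rest =>
    ((1 : Int) + ((rest.takeWhile (fun y => y == x)).length : Int))
      :: rleAux (rest.dropWhile (fun y => y == x))
termination_by xs.length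
decreasing_by
  simp only [List.length_cons]
  exact Nat.lt_succ_of_le (List.length_dropWhile_le _ _)

-- literal port of Source B's solution: days comprehension over zip, prefix-max loop, RLE
def solution_alt (progresses : List Int) (speeds : List Int) : List Int :=
  let days := (progresses.zip speeds).map (fun ab => -(PySem.Int.floordiv (ab.1 - 100) ab.2))
  let st := days.foldl
      (fun (st : List Int × Int) d =>
        let m := if st.2 ≥ d then st.2 else d
        (st.1 ++ [m], m)) ([], PySem.List.pyGetD days 0 0)
  rleAux st.1

-- ===== PRECONDITION & SPEC =====
-- Pre_ excludes exactly the inputs where A raises: empty progresses (IndexError on fin_dates[0]),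
-- speeds shorter than progresses (IndexError on speeds[i]), and a zero speed among the used ones (ZeroDivisionError).
def Pre_solution (progresses : List Int) (speeds : List Int) : Prop :=
  progresses ≠ [] ∧ progresses.length ≤ speeds.length ∧
    ∀ b ∈ speeds.take progresses.length, b ≠ 0
instance (progresses : List Int) (speeds : List Int) : Decidable (Pre_solution progresses speeds) := by
  unfold Pre_solution; infer_instance
def pvWitness_solution : List Int × List Int := ([93, 30, 55], [1, 30, 5])
def Spec_solution (progresses : List Int) (speeds : List Int) (out : List Int) : Prop := out = solution_alt progresses speeds
instance (progresses : List Int) (speeds : List Int) (out : List Int) : Decidable (Spec_solution progresses speeds out) := by unfold Spec_solution; infer_instance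

-- ===== CLAIM (what is proved, stated in full; the proofs are below) =====
def Claim_equal_solution : Prop := ∀ (progresses : List Int) (speeds : List Int), Dom_solution progresses speeds → Pre_solution progresses speeds → Spec_solution progresses speeds (solution progresses speeds)

-- ===== LEMMAS AND PROOFS =====

-- Python's  x = n//b; if n % b != 0: x += 1  equals the ceiling division  -((-n)//b)  for every b ≠ 0.
theorem ceil_eq_pos (n b : Int) (hb : 0 < b) :
    (if PySem.Int.mod n b ≠ 0 then PySem.Int.floordiv n b + 1 else PySem.Int.floordiv n b)
      = -(PySem.Int.floordiv (-n) b) := by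
  have hqr := PySem.Int.floordiv_mul_add_mod n b
  have hr0 := PySem.Int.mod_nonneg n hb
  have hrb := PySem.Int.mod_lt n hb
  have e1 : (PySem.Int.floordiv n b + 1 - 1) * b = PySem.Int.floordiv n b * b := by ring
  have e2 : (PySem.Int.floordiv n b + 1) * b = PySem.Int.floordiv n b * b + b := by ring
  have e3 : (PySem.Int.floordiv n b - 1) * b = PySem.Int.floordiv n b * b - b := by ring
  symm
  rw [PySem.Int.neg_floordiv_neg_eq_iff_of_pos hb]
  split_ifs with h
  · have hrpos : 0 < PySem.Int.mod n b := lt_of_le_of_ne hr0 (Ne.symm h)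
    constructor
    · rw [e1]; linarith
    · rw [e2]; linarith
  · have hr : PySem.Int.mod n b = 0 := by omega
    constructor
    · rw [e3]; linarith
    · linarith

theorem ceil_eq (n b : Int) (hb : b ≠ 0) :
    (if PySem.Int.mod n b ≠ 0 then PySem.Int.floordiv n b + 1 else PySem.Int.floordiv n b)
      = -(PySem.Int.floordiv (-n) b) := by
  rcases lt_or_gt_of_ne hb with hneg | hpos
  · have key := ceil_eq_pos (-n) (-b) (by omega)
    rw [neg_neg] at key
    rw [PySem.Int.mod_neg_neg, PySem.Int.floordiv_neg_neg] at key
    simp only [neg_ne_zero] at key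
    rw [key]
    have h4 : PySem.Int.floordiv (-n) b = PySem.Int.floordiv n (-b) := by
      have := PySem.Int.floordiv_neg_neg n (-b)
      rwa [neg_neg] at this
    rw [h4]
  · exact ceil_eq_pos n b hpos

-- A's first loop produces exactly B's per-pair ceiling deadlines over the zipped input.
theorem finDates_eq (p s : List Int) (h : p.length ≤ s.length)
    (hnz : ∀ b ∈ s.take p.length, b ≠ 0) :
    (PySem.List.pyRange 0 (p.length : Int)).foldl
      (fun acc i =>
        let a := PySem.List.pyGetD p i 0
        let b := PySem.List.pyGetD s i 0
        let x := PySem.Int.floordiv (100 - a) b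
        let x := if PySem.Int.mod (100 - a) b ≠ 0 then x + 1 else x
        acc ++ [x]) []
      = (p.zip s).map (fun ab => -(PySem.Int.floordiv (ab.1 - 100) ab.2)) := by
  rw [PySem.List.pyRange_zero_natCast]
  rw [PySem.List.foldl_append_singleton_eq_map
        (f := fun i => if PySem.Int.mod (100 - PySem.List.pyGetD p i 0) (PySem.List.pyGetD s i 0) ≠ 0
            then PySem.Int.floordiv (100 - PySem.List.pyGetD p i 0) (PySem.List.pyGetD s i 0) + 1
            else PySem.Int.floordiv (100 - PySem.List.pyGetD p i 0) (PySem.List.pyGetD s i 0))]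
  rw [List.nil_append]
  apply List.ext_getElem
  · simp [Nat.min_eq_left h]
  · intro i h1 h2
    have hip : i < p.length := by simpa using h1
    have his : i < s.length := lt_of_lt_of_le hip h
    have hbnz : s[i] ≠ 0 := by
      apply hnz
      have ht : (s.take p.length)[i]'(by simp; omega) = s[i] := List.getElem_take
      rw [← ht]; exact List.getElem_mem _
    simp only [List.getElem_map, List.getElem_range, List.getElem_zip,
      PySem.List.pyGetD_natCast]
    rw [List.getD_eq_getElem p 0 hip, List.getD_eq_getElem s 0 his]
    have hc := ceil_eq (100 - p[i]) s[i] hbnz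
    rw [neg_sub] at hc
    exact hc

-- prefix-maximum sequence starting from running max m (proof-side abbreviation)
def pmList (m : Int) : List Int → List Int
  | [] => []
  | d :: rest =>
    let m' := if m ≥ d then m else d
    m' :: pmList m' rest

-- B's prefix-max foldl builds acc ++ pmList m days
theorem pm_fold (days : List Int) (acc : List Int) (m : Int) :
    (days.foldl (fun (st : List Int × Int) d =>
        let m' := if st.2 ≥ d then st.2 else d
        (st.1 ++ [m'], m')) (acc, m)).1 = acc ++ pmList m days := by
  induction days generalizing acc m with
  | nil => simp [pmList]
  | cons d rest ih =>
    simp only [List.foldl_cons, pmList]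
    rw [ih]
    simp

-- run-length encoding with a pending run (value cm, count cc)
def rleP (cm cc : Int) : List Int → List Int
  | [] => [cc]
  | x :: rest => if x = cm then rleP cm (cc + 1) rest else cc :: rleP x 1 rest

-- rleAux on a run started at x with pending count cc
theorem rleP_eq_rleAux (xs : List Int) (x cc : Int) :
    rleP x cc xs
      = (cc + ((xs.takeWhile (fun y => y == x)).length : Int))
          :: rleAux (xs.dropWhile (fun y => y == x)) := by
  induction xs generalizing x cc with
  | nil => simp [rleP, rleAux]
  | cons y rest ih =>
    by_cases h : y = x
    · subst h
      simp only [rleP, List.takeWhile_cons, List.dropWhile_cons, beq_self_eq_true, if_true]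
      rw [ih]
      simp only [List.length_cons]
      congr 1
      push_cast
      ring
    · simp only [rleP, if_neg h, List.takeWhile_cons, List.dropWhile_cons]
      have hb : (y == x) = false := by simp [h]
      rw [hb]
      simp only [Bool.false_eq_true, if_false, List.length_nil, Int.natCast_zero, add_zero]
      rw [ih y 1, rleAux]

theorem rleAux_cons (x : Int) (xs : List Int) : rleAux (x :: xs) = rleP x 1 xs := by
  rw [rleAux, rleP_eq_rleAux]

-- A's grouping fold computes the run lengths of the prefix-maximum sequence
theorem afold_eq (rest : List Int) (ans : List Int) (cm cc : Int) :
    (let st := rest.foldl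
        (fun (st : List Int × Int × Int) val =>
          if st.2.1 ≥ val then (st.1, st.2.1, st.2.2 + 1)
          else (st.1 ++ [st.2.2], val, 1)) (ans, cm, cc)
     st.1 ++ [st.2.2]) = ans ++ rleP cm cc (pmList cm rest) := by
  induction rest generalizing ans cm cc with
  | nil => simp [rleP, pmList]
  | cons d tl ih =>
    simp only [List.foldl_cons, pmList]
    by_cases h : cm ≥ d
    · simp only [if_pos h]
      rw [ih ans cm (cc + 1)]
      simp [rleP]
    · simp only [if_neg h]
      rw [ih (ans ++ [cc]) d 1]
      have hne : d ≠ cm := by omega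
      simp [rleP, hne]

-- ===== VERDICT (by name: the statement is the Claim_ definition above) =====
theorem solution_spec : Claim_equal_solution := by
  intro p s _hdom hpre
  obtain ⟨hne, hlen, hnz⟩ := hpre
  unfold Spec_solution solution solution_alt
  rw [finDates_eq p s hlen hnz]
  cases p with
  | nil => exact absurd rfl hne
  | cons p0 ps =>
    cases s with
    | nil => simp at hlen
    | cons s0 ss =>
      simp only [List.zip_cons_cons, List.map_cons]
      rw [afold_eq]
      rw [pm_fold]
      rw [List.nil_append]
      have h0 : PySem.List.pyGetD
          (-(PySem.Int.floordiv (p0 - 100) s0)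
            :: (ps.zip ss).map (fun ab => -(PySem.Int.floordiv (ab.1 - 100) ab.2))) 0 0
          = -(PySem.Int.floordiv (p0 - 100) s0) := by
        simp [PySem.List.pyGetD_zero_cons]
      rw [h0]
      have hself : pmList (-(PySem.Int.floordiv (p0 - 100) s0))
            (-(PySem.Int.floordiv (p0 - 100) s0)
              :: (ps.zip ss).map (fun ab => -(PySem.Int.floordiv (ab.1 - 100) ab.2)))
          = -(PySem.Int.floordiv (p0 - 100) s0)
              :: pmList (-(PySem.Int.floordiv (p0 - 100) s0))
                ((ps.zip ss).map (fun ab => -(PySem.Int.floordiv (ab.1 - 100) ab.2))) := by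
        simp [pmList]
      rw [hself]
      simp only [List.nil_append]
      rw [rleAux_cons]
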